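-- pv_equiv track=rewrite | github.com/gruber-sciencelab/nTerminalExon | scripts/create-main-config-file.py | generate_windows
-- ===== SOURCE A (Python) =====
-- def generate_windows(size, up, down):
--     """Generate encoding for the sliding windows."""
--     windows = []
--     s = -1 * up
--     e = s + size
--     while e <= down:
--         windows.append((s, e))
--         s = s + int(float(size) / 2.0)
--         e = e + int(float(size) / 2.0)
--     # convert to dirextory names
--     windows_directories = []
--     for win in windows:
--         if win[0] < 0 and win[1] <= 0:  # upstream ss
--             windows_directories.append(
--                 "u" + str(-1 * win[0]) + "to" + str(-1 * win[1]) + ".d0to0"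
--             )
--         elif win[0] >= 0 and win[1] > 0:  # downstream ss
--             windows_directories.append("u0to0.d" + str(win[0]) + "to" + str(win[1]))
--         else:  # window goes through ss
--             windows_directories.append(
--                 "u" + str(-1 * win[0]) + "to0.d0to" + str(win[1])
--             )
--     return windows_directories
-- ===== SOURCE B (Python) =====
-- def _name(s, e):
--     """Branch-free window name: clamp the window to each side of the splice site."""
--     return "u%dto%d.d%dto%d" % (max(-s, 0), max(-e, 0), max(s, 0), max(e, 0))
--
--
-- def generate_windows(size, up, down):
--     """Generate encoding for the sliding windows."""
--     # Closed form: compute the number of windows directly, then produce the i-th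
--     # window from its index; no simulated sliding state.
--     step = int(size / 2)
--     first_end = size - up
--     if first_end > down:
--         return []
--     n = (down - first_end) // step + 1
--     return [_name(i * step - up, i * step - up + size) for i in range(n)]
-- ===== Notes on version B (the rewrite author's own statement) =====
-- stated objective: alternative
-- what changed: B replaces A's two-phase stateful simulation (a while loop sliding (s,e) and a second loop with three sign branches) by a closed form: it computes the window count n = (down-first_end)//step + 1 directly, generates the i-th window from its index, and names every window with one branch-free clamping formula max(+/-s,0)/max(+/-e,0) instead of the three-way case split.
import Mathlib
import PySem

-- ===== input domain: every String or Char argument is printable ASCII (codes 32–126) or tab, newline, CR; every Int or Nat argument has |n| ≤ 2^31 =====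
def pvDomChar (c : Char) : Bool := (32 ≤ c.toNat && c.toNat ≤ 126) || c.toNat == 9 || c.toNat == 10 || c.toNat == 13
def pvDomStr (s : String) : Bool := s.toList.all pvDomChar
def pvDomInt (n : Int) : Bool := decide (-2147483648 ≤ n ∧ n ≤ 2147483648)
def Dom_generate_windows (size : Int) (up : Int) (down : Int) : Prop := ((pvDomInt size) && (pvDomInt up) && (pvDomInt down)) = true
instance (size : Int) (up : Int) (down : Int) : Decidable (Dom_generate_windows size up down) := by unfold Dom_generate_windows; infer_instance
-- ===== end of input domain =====

-- B replaces A's stateful two-phase sliding loop by a closed form: window count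
-- n = (down - first_end) // step + 1 computed directly, the i-th window produced from
-- its index, and a single branch-free clamping formula instead of three sign branches.
-- Objective: alternative (same O(n) cost, different algorithm).


-- ===== PORT A =====
-- Python's int(float(size) / 2.0): for |size| ≤ 2^31 the float division is exact and
-- int(·) truncates toward zero, i.e. Int.tdiv size 2 (exact on the stated domain).
-- the while loop collecting (s, e) pairs; fuel only makes A's loop total (it exceeds
-- the iteration count on every input Pre_ admits)
def pvWinLoop (step down : Int) (s e : Int) (fuel : Nat) : List (Int × Int) :=
  match fuel with
  | 0 => []
  | f + 1 =>
    if e ≤ down then (s, e) :: pvWinLoop step down (s + step) (e + step) f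
    else []

-- body of A's second (for) loop: one window to its directory name
def pvWinDir (win : Int × Int) : String :=
  if win.1 < 0 ∧ win.2 ≤ 0 then
    "u" ++ PySem.Int.toStr (-1 * win.1) ++ "to" ++ PySem.Int.toStr (-1 * win.2) ++ ".d0to0"
  else if win.1 ≥ 0 ∧ win.2 > 0 then
    "u0to0.d" ++ PySem.Int.toStr win.1 ++ "to" ++ PySem.Int.toStr win.2
  else
    "u" ++ PySem.Int.toStr (-1 * win.1) ++ "to0.d0to" ++ PySem.Int.toStr win.2

def generate_windows (size : Int) (up : Int) (down : Int) : List String :=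
  let s := -1 * up
  let e := s + size
  let windows := pvWinLoop (Int.tdiv size 2) down s e ((down - e).toNat + 1)
  windows.map pvWinDir

-- ===== PORT B =====
-- Source B's _name: branch-free clamping formula ("u%dto%d.d%dto%d" % …)
def pvName (s e : Int) : String :=
  "u" ++ PySem.Int.toStr (max (-s) 0) ++ "to" ++ PySem.Int.toStr (max (-e) 0) ++
  ".d" ++ PySem.Int.toStr (max s 0) ++ "to" ++ PySem.Int.toStr (max e 0)

def generate_windows_alt (size : Int) (up : Int) (down : Int) : List String :=
  let step := Int.tdiv size 2          -- int(size / 2): exact on the stated domain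
  let firstEnd := size - up
  if down < firstEnd then []
  else
    let n := PySem.Int.floordiv (down - firstEnd) step + 1
    (PySem.List.pyRange 0 n 1).map (fun i => pvName (i * step - up) (i * step - up + size))

-- ===== PRECONDITION & SPEC =====
-- Pre_ excludes exactly the inputs on which A's while loop never terminates: a
-- non-positive step (size ≤ 1) together with a first window end already ≤ down.
def Pre_generate_windows (size : Int) (up : Int) (down : Int) : Prop :=
  0 < Int.tdiv size 2 ∨ down < size - up
instance (size : Int) (up : Int) (down : Int) : Decidable (Pre_generate_windows size up down) := by unfold Pre_generate_windows; infer_instance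

def pvWitness_generate_windows : Int × Int × Int := (4, 2, 10)

def Spec_generate_windows (size : Int) (up : Int) (down : Int) (out : List String) : Prop := out = generate_windows_alt size up down
instance (size : Int) (up : Int) (down : Int) (out : List String) : Decidable (Spec_generate_windows size up down out) := by unfold Spec_generate_windows; infer_instance

-- ===== CLAIM (what is proved, stated in full; the proofs are below) =====
def Claim_equal_generate_windows : Prop := ∀ (size : Int) (up : Int) (down : Int), Dom_generate_windows size up down → Pre_generate_windows size up down → Spec_generate_windows size up down (generate_windows size up down)

-- ===== LEMMAS AND PROOFS =====

theorem pv_tdiv2_pos_iff (size : Int) : 0 < Int.tdiv size 2 ↔ 2 ≤ size := by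
  rcases Int.lt_or_le size 0 with h | h
  · have h2 : Int.tdiv size 2 = -(Int.tdiv (-size) 2) := by rw [Int.neg_tdiv]; omega
    rw [h2, Int.tdiv_eq_ediv_of_nonneg (by omega)]; omega
  · rw [Int.tdiv_eq_ediv_of_nonneg h]; omega

-- the three-branch classifier equals the clamping formula on every proper window (s < e)
theorem pv_name_eq (s e : Int) (h : s < e) : pvWinDir (s, e) = pvName s e := by
  have h0 : PySem.Int.toStr 0 = "0" := rfl
  unfold pvWinDir pvName
  dsimp only
  split_ifs with h1 h2
  · obtain ⟨hs, he⟩ := h1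
    rw [max_eq_left (by omega : (0:Int) ≤ -s), max_eq_left (by omega : (0:Int) ≤ -e),
        max_eq_right (by omega : s ≤ 0), max_eq_right (by omega : e ≤ 0), h0]
    simp only [neg_mul, one_mul, String.append_assoc]
    rfl
  · obtain ⟨hs, he⟩ := h2
    rw [max_eq_right (by omega : -s ≤ 0), max_eq_right (by omega : -e ≤ 0),
        max_eq_left (by omega : (0:Int) ≤ s), max_eq_left (by omega : (0:Int) ≤ e), h0]
    simp only [String.append_assoc]
    rfl
  · -- remaining case with s < e: necessarily s < 0 < e
    have hs : s < 0 := by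
      rcases Int.lt_or_le s 0 with h' | h'
      · exact h'
      · exact absurd ⟨h', by omega⟩ h2
    have he : 0 < e := by omega
    rw [max_eq_left (by omega : (0:Int) ≤ -s), max_eq_right (by omega : -e ≤ 0),
        max_eq_right (by omega : s ≤ 0), max_eq_left (by omega : (0:Int) ≤ e), h0]
    simp only [neg_mul, one_mul, String.append_assoc]
    rfl

-- floordiv recurrence: one step of the slide removes one window from the count
theorem pv_floordiv_step (d step : Int) (hstep : 0 < step) (hd : 0 ≤ d) :
    PySem.Int.floordiv d step =
      if step ≤ d then PySem.Int.floordiv (d - step) step + 1 else 0 := by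
  split_ifs with h
  · have hq := PySem.Int.floordiv_mul_add_mod (d - step) step
    have hm1 := PySem.Int.mod_nonneg (d - step) hstep
    have hm2 := PySem.Int.mod_lt (d - step) hstep
    rw [PySem.Int.floordiv_eq_iff_of_pos hstep]
    constructor <;> nlinarith
  · rw [PySem.Int.floordiv_eq_iff_of_pos hstep]
    constructor <;> omega

-- nonnegativity of the remaining-window count
theorem pv_floordiv_nonneg (d step : Int) (hstep : 0 < step) (hd : 0 ≤ d) :
    0 ≤ PySem.Int.floordiv d step := by
  have hq := PySem.Int.floordiv_mul_add_mod d step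
  have hm2 := PySem.Int.mod_lt d hstep
  nlinarith

-- index shift for a mapped unit range
theorem pv_pyRange_shift (n : Int) (g g' : Int → String)
    (hg : ∀ i, g (i + 1) = g' i) :
    (PySem.List.pyRange (0 + 1) (n + 1) 1).map g = (PySem.List.pyRange 0 n 1).map g' := by
  rw [PySem.List.pyRange_one, PySem.List.pyRange_one, List.map_map, List.map_map]
  have hlen : (n + 1 - (0 + 1)).toNat = (n - 0).toNat := by omega
  rw [hlen]
  refine List.map_congr_left ?_
  intro k _
  simp only [Function.comp]
  rw [show (0:Int) + 1 + k = (0 + k) + 1 by ring, hg]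

-- master lemma: A's fueled slide, named, equals B's indexed range

theorem pv_master (step size down : Int) (hstep : 0 < step) (hsize : 2 ≤ size) :
    ∀ (fuel : Nat) (s : Int), (down - (s + size)).toNat < fuel →
      (pvWinLoop step down s (s + size) fuel).map pvWinDir =
        if s + size ≤ down then
          (PySem.List.pyRange 0 (PySem.Int.floordiv (down - (s + size)) step + 1) 1).map
            (fun i => pvName (i * step + s) (i * step + s + size))
        else [] := by
  intro fuel
  induction fuel with
  | zero => intro s hf; omega
  | succ f ih =>
    intro s hf
    by_cases hle : s + size ≤ down
    · rw [if_pos hle]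
      have hstep_eq := pv_floordiv_step (down - (s + size)) step hstep (by omega)
      have hq0 : 0 ≤ PySem.Int.floordiv (down - (s + size)) step :=
        pv_floordiv_nonneg _ _ hstep (by omega)
      simp only [pvWinLoop, if_pos hle, List.map]
      rw [PySem.List.pyRange_one_cons (by omega : (0:Int) < PySem.Int.floordiv (down - (s + size)) step + 1)]
      simp only [List.map]
      congr 1
      · rw [pv_name_eq s (s + size) (by omega),
           show (0:Int) * step + s = s by ring]
      · have hcomm : s + size + step = s + step + size := by ring
        rw [hcomm]
        by_cases hle2 : s + step + size ≤ down
        · have hq : PySem.Int.floordiv (down - (s + size)) step =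
              PySem.Int.floordiv (down - (s + step + size)) step + 1 := by
            rw [hstep_eq, if_pos (by omega)]
            congr 2
            ring
          rw [ih (s + step) (by omega), if_pos hle2, hq]
          refine (pv_pyRange_shift _ _ _ (fun i => ?_)).symm
          rw [show (i + 1) * step + s = i * step + (s + step) by ring]
        · have hq : PySem.Int.floordiv (down - (s + size)) step = 0 := by
            rw [hstep_eq, if_neg (by omega)]
          rw [hq]
          cases f <;>
            simp [pvWinLoop, show ¬ (s + step + size ≤ down) from hle2]
    · rw [if_neg hle]
      simp [pvWinLoop, hle]

-- ===== VERDICT (by name: the statement is the Claim_ definition above) =====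
theorem generate_windows_spec : Claim_equal_generate_windows := by
  intro size up down _ hpre
  unfold Spec_generate_windows generate_windows generate_windows_alt
  simp only [neg_mul, one_mul]
  by_cases hle : down < size - up
  · rw [if_pos hle]
    have hf : (down - (-up + size)).toNat + 1 = 1 := by omega
    rw [hf]
    simp [pvWinLoop, show ¬ (-up + size ≤ down) by omega]
  · rw [if_neg hle]
    have hstep : 0 < Int.tdiv size 2 := by
      rcases hpre with h | h
      · exact h
      · omega
    have hsize : 2 ≤ size := (pv_tdiv2_pos_iff size).mp hstep
    rw [pv_master (Int.tdiv size 2) size down hstep hsize ((down - (-up + size)).toNat + 1) (-up) (by omega),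
        if_pos (by omega : -up + size ≤ down)]
    have harg : down - (-up + size) = down - (size - up) := by ring
    rw [harg]
    refine List.map_congr_left ?_
    intro i _
    rw [show i * Int.tdiv size 2 + -up = i * Int.tdiv size 2 - up by ring]
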